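-- pv_equiv track=rewrite | github.com/tianxiongWang/codewars | Braces.py | validBraces2
-- ===== SOURCE A (Python) =====
-- def validBraces2(string):
--     x, z, d = 0, 0, 0
--     for i in string:
--         if i == '(':
--             x += 1
--         if i == '[':
--             z += 1
--         if i == '{':
--             d += 1
--         if i == ')':
--             x -= 1
--         if i == ']':
--             z -= 1
--         if i == '}':
--             d -= 1
--         if x < 0 or z < 0 or d < 0:
--             return False
--             break
--     if x == 0 and z == 0 and d == 0:
--         return True
--     else:
--         return False
-- ===== SOURCE B (Python) =====
-- def validBraces2(string):
--     for opener, closer in (('(', ')'), ('[', ']'), ('{', '}')):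
--         balance = 0
--         for ch in string:
--             if ch == opener:
--                 balance += 1
--             elif ch == closer:
--                 balance -= 1
--                 if balance < 0:
--                     return False
--         if balance != 0:
--             return False
--     return True
-- ===== Notes on version B (the rewrite author's own statement) =====
-- stated objective: simpler
-- what changed: Replaced the single pass with three shared counters and a combined negativity test by three independent per-bracket-type scans, each with its own balance counter, early exit on negative prefix and final zero check.
import Mathlib
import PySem

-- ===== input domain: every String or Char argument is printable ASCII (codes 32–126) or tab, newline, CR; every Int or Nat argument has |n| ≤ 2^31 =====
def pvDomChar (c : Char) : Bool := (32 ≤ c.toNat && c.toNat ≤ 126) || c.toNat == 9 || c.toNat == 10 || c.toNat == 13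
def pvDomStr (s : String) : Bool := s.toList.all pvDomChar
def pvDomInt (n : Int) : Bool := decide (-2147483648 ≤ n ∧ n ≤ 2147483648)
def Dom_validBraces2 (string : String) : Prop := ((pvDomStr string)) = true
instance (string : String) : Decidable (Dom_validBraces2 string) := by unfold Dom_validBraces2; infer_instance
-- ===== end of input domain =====

-- B replaces A's single pass with three shared counters by three independent per-bracket-type scans (objective: simpler).

-- ===== PORT A =====
-- A's for-loop with early return, carrying the three counters x z d.
def validBraces2Loop : List Char → Int → Int → Int → Bool
  | [], x, z, d => if x = 0 ∧ z = 0 ∧ d = 0 then true else false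
  | i :: rest, x, z, d =>
    let x := if i = '(' then x + 1 else x
    let z := if i = '[' then z + 1 else z
    let d := if i = '{' then d + 1 else d
    let x := if i = ')' then x - 1 else x
    let z := if i = ']' then z - 1 else z
    let d := if i = '}' then d - 1 else d
    if x < 0 ∨ z < 0 ∨ d < 0 then false
    else validBraces2Loop rest x z d

def validBraces2 (string : String) : Bool :=
  validBraces2Loop string.toList 0 0 0

-- ===== PORT B =====
-- B's inner scan for one bracket pair: single balance counter, early exit on negative.
def validBraces2Scan (opener closer : Char) : List Char → Int → Bool
  | [], balance => balance = 0
  | ch :: rest, balance =>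
    if ch = opener then validBraces2Scan opener closer rest (balance + 1)
    else if ch = closer then
      if balance - 1 < 0 then false
      else validBraces2Scan opener closer rest (balance - 1)
    else validBraces2Scan opener closer rest balance

def validBraces2_alt (string : String) : Bool :=
  validBraces2Scan '(' ')' string.toList 0
    && validBraces2Scan '[' ']' string.toList 0
    && validBraces2Scan '{' '}' string.toList 0

-- ===== PRECONDITION & SPEC =====
def Spec_validBraces2 (string : String) (out : Bool) : Prop := out = validBraces2_alt string
instance (string : String) (out : Bool) : Decidable (Spec_validBraces2 string out) := by unfold Spec_validBraces2; infer_instance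

-- ===== CLAIM (what is proved, stated in full; the proofs are below) =====
def Claim_equal_validBraces2 : Prop := ∀ (string : String), Dom_validBraces2 string → Spec_validBraces2 string (validBraces2 string)

-- ===== LEMMAS AND PROOFS =====

-- step function used only by the proofs below
def pvStep (o c i : Char) (b : Int) : Int :=
  if i = o then b + 1 else if i = c then b - 1 else b

theorem pvUpd (o c i : Char) (hoc : o ≠ c) (b : Int) :
    (if i = c then (if i = o then b + 1 else b) - 1 else (if i = o then b + 1 else b))
      = pvStep o c i b := by
  unfold pvStep
  by_cases h1 : i = o <;> by_cases h2 : i = c <;> simp_all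

theorem pvScan_cons (o c i : Char) (hoc : o ≠ c) (rest : List Char) (b : Int) (hb : 0 ≤ b) :
    validBraces2Scan o c (i :: rest) b =
      ((!decide (pvStep o c i b < 0)) && validBraces2Scan o c rest (pvStep o c i b)) := by
  have hco : c ≠ o := Ne.symm hoc
  simp only [validBraces2Scan, pvStep]
  by_cases h1 : i = o <;> by_cases h2 : i = c <;>
    simp only [h1, h2, hco] <;>
    first
      | (simp [h1, h2, hco, show ¬(b + 1 < 0) by omega]; done)
      | (simp [h1, h2, hco, show ¬(b < 0) by omega]; done)
      | (by_cases hb1 : b - 1 < 0 <;> simp [h1, h2, hco, hb1]; done)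

theorem validBraces2_loop_eq (l : List Char) :
    ∀ x z d : Int, 0 ≤ x → 0 ≤ z → 0 ≤ d →
      validBraces2Loop l x z d =
        (validBraces2Scan '(' ')' l x && validBraces2Scan '[' ']' l z
          && validBraces2Scan '{' '}' l d) := by
  induction l with
  | nil =>
    intro x z d hx hz hd
    simp [validBraces2Loop, validBraces2Scan]
    by_cases h1 : x = 0 <;> by_cases h2 : z = 0 <;> by_cases h3 : d = 0 <;>
      simp [h1, h2, h3]
  | cons i rest ih =>
    intro x z d hx hz hd
    simp only [validBraces2Loop]
    rw [pvUpd '(' ')' i (by decide) x, pvUpd '[' ']' i (by decide) z,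
        pvUpd '{' '}' i (by decide) d,
        pvScan_cons '(' ')' i (by decide) rest x hx, pvScan_cons '[' ']' i (by decide) rest z hz,
        pvScan_cons '{' '}' i (by decide) rest d hd]
    by_cases h : pvStep '(' ')' i x < 0 ∨ pvStep '[' ']' i z < 0 ∨ pvStep '{' '}' i d < 0
    · rw [if_pos h]
      rcases h with h | h | h <;> simp [h]
    · push_neg at h
      obtain ⟨h1, h2, h3⟩ := h
      rw [if_neg (by omega)]
      rw [ih _ _ _ (by omega) (by omega) (by omega)]
      simp [show ¬(pvStep '(' ')' i x < 0) by omega,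
            show ¬(pvStep '[' ']' i z < 0) by omega,
            show ¬(pvStep '{' '}' i d < 0) by omega]

theorem validBraces2_spec : Claim_equal_validBraces2 := by
  intro s _
  unfold Spec_validBraces2 validBraces2 validBraces2_alt
  exact validBraces2_loop_eq s.toList 0 0 0 le_rfl le_rfl le_rfl
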